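-- pv_equiv track=rewrite | github.com/JeffVallyath/Project-Kakerou | btom_engine/claim_tracker.py | _activities_incompatible
-- ===== SOURCE A (Python) =====
-- def _activities_incompatible(act_a: str, act_b: str) -> bool:
--     """Check if two activities can't happen simultaneously."""
--     # Define incompatible activity groups
--     groups = [
--         {"gym", "working out", "lifting", "doing chest", "doing legs", "doing back", "at gym"},
--         {"playing", "gaming", "playing valorant", "playing val", "on valorant"},
--         {"sleeping", "asleep", "napping", "in bed"},
--         {"at work", "working", "in a meeting", "at the office"},
--         {"at home", "home", "at my place"},
--         {"driving", "on the road", "in the car"},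
--         {"at school", "in class", "studying"},
--     ]
--
--     for group in groups:
--         a_match = any(g in act_a for g in group)
--         b_match = any(g in act_b for g in group)
--         if a_match and not b_match:
--             # Check if b is in a DIFFERENT group
--             for other_group in groups:
--                 if other_group is group:
--                     continue
--                 if any(g in act_b for g in other_group):
--                     return True
--
--     return False
-- ===== SOURCE B (Python) =====
-- def _activities_incompatible(act_a: str, act_b: str) -> bool:
--     """Check if two activities can't happen simultaneously."""
--     groups = [
--         {"gym", "working out", "lifting", "doing chest", "doing legs", "doing back", "at gym"},
--         {"playing", "gaming", "playing valorant", "playing val", "on valorant"},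
--         {"sleeping", "asleep", "napping", "in bed"},
--         {"at work", "working", "in a meeting", "at the office"},
--         {"at home", "home", "at my place"},
--         {"driving", "on the road", "in the car"},
--         {"at school", "in class", "studying"},
--     ]
--     a_groups = {i for i, group in enumerate(groups) if any(g in act_a for g in group)}
--     b_groups = {i for i, group in enumerate(groups) if any(g in act_b for g in group)}
--     return bool(b_groups) and not a_groups <= b_groups
-- ===== Notes on version B (the rewrite author's own statement) =====
-- stated objective: simpler
-- what changed: Instead of A's nested loops with early return (for each group matched by act_a but not act_b, rescan all other groups for a b-match), B builds the two sets of group indices matched by each activity in one comprehension each and returns bool(b_groups) and not a_groups <= b_groups.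
import Mathlib
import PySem

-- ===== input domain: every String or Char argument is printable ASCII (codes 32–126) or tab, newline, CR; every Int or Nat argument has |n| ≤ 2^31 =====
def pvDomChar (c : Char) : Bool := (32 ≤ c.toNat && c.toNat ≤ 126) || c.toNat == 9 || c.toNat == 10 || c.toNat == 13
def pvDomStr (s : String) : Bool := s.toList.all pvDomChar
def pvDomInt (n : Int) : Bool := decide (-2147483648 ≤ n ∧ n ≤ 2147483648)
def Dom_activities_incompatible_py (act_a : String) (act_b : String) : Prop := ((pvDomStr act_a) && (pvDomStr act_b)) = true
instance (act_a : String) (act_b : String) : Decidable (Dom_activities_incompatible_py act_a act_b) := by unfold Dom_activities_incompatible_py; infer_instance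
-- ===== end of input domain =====

-- B replaces A's nested scan-with-early-return by building the two sets of matched
-- group indices once and comparing them (objective: simpler; same asymptotic cost).

-- ===== PORT A =====
-- the fixed list of incompatible activity groups (Python set literals; `any` over a set
-- is order-independent, so the written order is kept)
def pvGroups : List (List String) := [
  ["gym", "working out", "lifting", "doing chest", "doing legs", "doing back", "at gym"],
  ["playing", "gaming", "playing valorant", "playing val", "on valorant"],
  ["sleeping", "asleep", "napping", "in bed"],
  ["at work", "working", "in a meeting", "at the office"],
  ["at home", "home", "at my place"],
  ["driving", "on the road", "in the car"],
  ["at school", "in class", "studying"]]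

-- any(g in act for g in group)
def pvAnyIn (group : List String) (act : String) : Bool :=
  group.any (fun g => PySem.Str.isIn g act)

-- inner loop `for other_group in groups: if other_group is group: continue; …` with
-- early return True; `is` identity is transliterated as position identity (the seven
-- set literals are seven distinct objects), hence the enumerated list.
def pvInner (act_b : String) (gi : Int) : List (Int × List String) → Bool
  | [] => false
  | (j, other_group) :: rest =>
    if j = gi then pvInner act_b gi rest
    else if pvAnyIn other_group act_b then true
    else pvInner act_b gi rest

-- outer loop `for group in groups: …` with early return True
def pvOuter (act_a : String) (act_b : String) : List (Int × List String) → Bool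
  | [] => false
  | (i, group) :: rest =>
    let a_match := pvAnyIn group act_a
    let b_match := pvAnyIn group act_b
    if a_match && !b_match then
      if pvInner act_b i (PySem.List.enumerate pvGroups) then true
      else pvOuter act_a act_b rest
    else pvOuter act_a act_b rest

def activities_incompatible_py (act_a : String) (act_b : String) : Bool :=
  pvOuter act_a act_b (PySem.List.enumerate pvGroups)

-- ===== PORT B =====
-- {i for i, group in enumerate(groups) if any(g in act for g in group)}
def pvGroupIdxSet (act : String) : List Int :=
  ((PySem.List.enumerate pvGroups).filter (fun p => pvAnyIn p.2 act)).map (fun p => p.1)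

-- bool(b_groups) and not a_groups <= b_groups
def activities_incompatible_py_alt (act_a : String) (act_b : String) : Bool :=
  let a_groups := pvGroupIdxSet act_a
  let b_groups := pvGroupIdxSet act_b
  !b_groups.isEmpty && !(a_groups.all (fun i => b_groups.contains i))

-- ===== PRECONDITION & SPEC =====
def Spec_activities_incompatible_py (act_a : String) (act_b : String) (out : Bool) : Prop := out = activities_incompatible_py_alt act_a act_b
instance (act_a : String) (act_b : String) (out : Bool) : Decidable (Spec_activities_incompatible_py act_a act_b out) := by unfold Spec_activities_incompatible_py; infer_instance

-- ===== CLAIM (what is proved, stated in full; the proofs are below) =====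
def Claim_equal_activities_incompatible_py : Prop := ∀ (act_a : String) (act_b : String), Dom_activities_incompatible_py act_a act_b → Spec_activities_incompatible_py act_a act_b (activities_incompatible_py act_a act_b)

-- ===== LEMMAS AND PROOFS =====
-- Both programs depend on the inputs only through the 14 booleans "group i matches
-- act_a" / "group i matches act_b"; after unfolding the fixed seven-group structure
-- and generalizing those atoms, the equality is a decidable fact about 14 Bools.
set_option maxHeartbeats 4000000 in
theorem pv_main (act_a act_b : String) :
    activities_incompatible_py act_a act_b = activities_incompatible_py_alt act_a act_b := by
  simp [activities_incompatible_py, activities_incompatible_py_alt, pvGroupIdxSet,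
    pvGroups, PySem.List.enumerate, pvOuter, pvInner, List.filter]
  generalize pvAnyIn ["gym", "working out", "lifting", "doing chest", "doing legs", "doing back", "at gym"] act_a = a0
  generalize pvAnyIn ["playing", "gaming", "playing valorant", "playing val", "on valorant"] act_a = a1
  generalize pvAnyIn ["sleeping", "asleep", "napping", "in bed"] act_a = a2
  generalize pvAnyIn ["at work", "working", "in a meeting", "at the office"] act_a = a3
  generalize pvAnyIn ["at home", "home", "at my place"] act_a = a4
  generalize pvAnyIn ["driving", "on the road", "in the car"] act_a = a5
  generalize pvAnyIn ["at school", "in class", "studying"] act_a = a6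
  generalize pvAnyIn ["gym", "working out", "lifting", "doing chest", "doing legs", "doing back", "at gym"] act_b = b0
  generalize pvAnyIn ["playing", "gaming", "playing valorant", "playing val", "on valorant"] act_b = b1
  generalize pvAnyIn ["sleeping", "asleep", "napping", "in bed"] act_b = b2
  generalize pvAnyIn ["at work", "working", "in a meeting", "at the office"] act_b = b3
  generalize pvAnyIn ["at home", "home", "at my place"] act_b = b4
  generalize pvAnyIn ["driving", "on the road", "in the car"] act_b = b5
  generalize pvAnyIn ["at school", "in class", "studying"] act_b = b6
  revert a0 a1 a2 a3 a4 a5 a6 b0 b1 b2 b3 b4 b5 b6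
  decide
-- ===== VERDICT (by name: the statement is the Claim_ definition above) =====
theorem activities_incompatible_py_spec : Claim_equal_activities_incompatible_py := by
  intro act_a act_b _
  unfold Spec_activities_incompatible_py
  exact pv_main act_a act_b
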